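-- pv_equiv track=rewrite | github.com/sharma2901/voter_ocr | extract_voter_data.py | process_voter_id
-- ===== SOURCE A (Python) =====
-- def process_voter_id(voter_id):
--     """Process voter ID with special handling for first 3 letters"""
--     # Clean the voter ID first
--     voter_id = ''.join(c for c in voter_id if c.isalnum())
--
--     if len(voter_id) >= 3:
--         # First 3 characters should be letters
--         prefix = voter_id[:3].upper()
--         numbers = voter_id[3:]
--
--         # Replace Z with 2 only in the number portion
--         numbers = numbers.replace('Z', '2').replace('z', '2')
--
--         return prefix + numbers
--     return voter_id
-- ===== SOURCE B (Python) =====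
-- def process_voter_id(voter_id):
--     """Process voter ID with special handling for first 3 letters"""
--     cleaned = ''.join(c for c in voter_id if c.isalnum())
--     if len(cleaned) >= 3:
--         # single pass: uppercase the 3-char prefix, map Z/z -> 2 in the rest
--         return ''.join(c.upper() if i < 3 else ('2' if c in ('Z', 'z') else c)
--                        for i, c in enumerate(cleaned))
--     return cleaned
-- ===== Notes on version B (the rewrite author's own statement) =====
-- stated objective: alternative
-- what changed: Replaces the slice/upper + two replace() passes over the tail with a single indexed pass over the cleaned string that uppercases positions 0-2 and maps Z/z to 2 elsewhere.
import Mathlib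
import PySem

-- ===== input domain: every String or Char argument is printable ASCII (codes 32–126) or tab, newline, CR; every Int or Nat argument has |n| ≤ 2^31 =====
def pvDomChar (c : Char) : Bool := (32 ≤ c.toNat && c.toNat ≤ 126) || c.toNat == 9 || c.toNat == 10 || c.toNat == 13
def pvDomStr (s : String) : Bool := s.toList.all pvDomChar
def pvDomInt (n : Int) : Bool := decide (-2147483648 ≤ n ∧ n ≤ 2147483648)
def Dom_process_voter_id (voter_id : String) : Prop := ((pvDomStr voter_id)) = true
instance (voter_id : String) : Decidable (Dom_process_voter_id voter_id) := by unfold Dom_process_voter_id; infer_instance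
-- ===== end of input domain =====

-- B replaces A's slice/upper + two replace passes by one indexed pass over the cleaned chars (alternative decomposition, same cost).
-- ===== PORT A =====
def process_voter_id (voter_id : String) : String :=
  let cleaned := voter_id.toList.filter PySem.Chars.isalnum
  if 3 ≤ cleaned.length then
    let pre := PySem.Chars.upper (PySem.List.slice cleaned none (some 3))
    let numbers := PySem.List.slice cleaned (some 3) none
    let numbers := PySem.Chars.replace (PySem.Chars.replace numbers ['Z'] ['2']) ['z'] ['2']
    String.ofList (pre ++ numbers)
  else String.ofList cleaned

-- ===== PORT B =====
def process_voter_id_alt (voter_id : String) : String :=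
  let cleaned := voter_id.toList.filter PySem.Chars.isalnum
  if 3 ≤ cleaned.length then
    String.ofList ((PySem.List.enumerate cleaned).map (fun p =>
      if p.1 < 3 then PySem.Chars.upperChar p.2
      else if p.2 = 'Z' ∨ p.2 = 'z' then '2' else p.2))
  else String.ofList cleaned

-- ===== PRECONDITION & SPEC =====
def Spec_process_voter_id (voter_id : String) (out : String) : Prop := out = process_voter_id_alt voter_id
instance (voter_id : String) (out : String) : Decidable (Spec_process_voter_id voter_id out) := by unfold Spec_process_voter_id; infer_instance

-- ===== CLAIM (what is proved, stated in full; the proofs are below) =====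
def Claim_equal_process_voter_id : Prop := ∀ (voter_id : String), Dom_process_voter_id voter_id → Spec_process_voter_id voter_id (process_voter_id voter_id)

-- ===== LEMMAS AND PROOFS =====

-- ===== VERDICT (by name: the statement is the Claim_ definition above) =====
-- single-char replace is a map
lemma replace_go_single (o n : Char) : ∀ (fuel : Nat) (l acc : List Char),
    l.length ≤ fuel →
    PySem.Chars.replace.go [o] [n] fuel l acc
      = acc.reverse ++ l.map (fun c => if c = o then n else c) := by
  intro fuel
  induction fuel with
  | zero =>
    intro l acc h
    have : l = [] := List.eq_nil_of_length_eq_zero (Nat.le_zero.mp h)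
    subst this
    simp [PySem.Chars.replace.go]
  | succ m ih =>
    intro l acc h
    cases l with
    | nil => simp [PySem.Chars.replace.go]
    | cons c t =>
      simp only [PySem.Chars.replace.go, List.isPrefixOf, List.map]
      by_cases hc : c = o
      · simp [hc, ih t (n :: acc) (by simpa using Nat.le_of_succ_le_succ h)]
      · simp [hc, Ne.symm hc, ih t (c :: acc) (by simpa using Nat.le_of_succ_le_succ h)]

lemma replace_single (o n : Char) (l : List Char) :
    PySem.Chars.replace l [o] [n] = l.map (fun c => if c = o then n else c) := by
  simpa [PySem.Chars.replace] using replace_go_single o n l.length l [] le_rfl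

-- the indexed pass splits at position 3
lemma enumerate_split (up r : Char → Char) : ∀ (l : List Char) (k : Int),
    (PySem.List.enumerate l k).map (fun p => if p.1 < 3 then up p.2 else r p.2)
      = (l.take (3 - k).toNat).map up ++ (l.drop (3 - k).toNat).map r := by
  intro l
  induction l with
  | nil => intro k; simp [PySem.List.enumerate]
  | cons c t ih =>
    intro k
    by_cases hk : k < 3
    · have h3 : (3 - k).toNat = (3 - (k + 1)).toNat + 1 := by omega
      simp [PySem.List.enumerate, hk, h3, ih (k + 1)]
    · have h3 : (3 - k).toNat = 0 := by omega
      have h3' : (3 - (k + 1)).toNat = 0 := by omega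
      simp [PySem.List.enumerate, hk, h3, ih (k + 1), h3']

-- ===== VERDICT (by name: the statement is the Claim_ definition above) =====
theorem process_voter_id_spec : Claim_equal_process_voter_id := by
  intro voter_id _
  unfold Spec_process_voter_id process_voter_id process_voter_id_alt
  set l := voter_id.toList.filter PySem.Chars.isalnum with hl
  by_cases h : 3 ≤ l.length
  · simp only [h, if_pos]
    congr 1
    rw [enumerate_split PySem.Chars.upperChar
        (fun c => if c = 'Z' ∨ c = 'z' then '2' else c) l 0,
        PySem.List.slice_to l (by norm_num), PySem.List.slice_from l (by norm_num),
        replace_single, replace_single]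
    simp only [Int.sub_zero, show ((3:Int)).toNat = 3 from rfl, PySem.Chars.upper, List.map_map]
    congr 1
    refine List.map_congr_left ?_
    intro c _
    by_cases h1 : c = 'Z' <;> by_cases h2 : c = 'z' <;> simp [h1, h2]
  · simp [h]
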